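-- pv_equiv track=rewrite | github.com/temiksvyatov/GroupingID | main.py | zeroStart
-- ===== SOURCE A (Python) =====
-- def zeroStart(n_customers):
--     groups = {}
--     for i in range(n_customers):
--         converted = sum(list(map(int, str(i))))
--         if groups.get(converted) == None:
--             groups[converted] = [i]
--         else:
--             groups[converted].append(i)
--     return groups
-- ===== SOURCE B (Python) =====
-- def zeroStart(n_customers):
--     # Incremental digit sum: ds(i+1) = ds(i) + 1 - 9 * (number of trailing 9s of i).
--     groups = {}
--     s = 0
--     for i in range(n_customers):
--         if s in groups:
--             groups[s].append(i)
--         else: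
--             groups[s] = [i]
--         s += 1
--         j = i
--         while j % 10 == 9:
--             s -= 9
--             j //= 10
--     return groups
-- ===== Notes on version B (the rewrite author's own statement) =====
-- stated objective: faster
-- what changed: B replaces the per-iteration str(i)->map(int)->sum digit-sum computation by an incrementally maintained digit sum updated in O(1) amortized via the carry rule ds(i+1)=ds(i)+1-9*(trailing nines of i).
import Mathlib
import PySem

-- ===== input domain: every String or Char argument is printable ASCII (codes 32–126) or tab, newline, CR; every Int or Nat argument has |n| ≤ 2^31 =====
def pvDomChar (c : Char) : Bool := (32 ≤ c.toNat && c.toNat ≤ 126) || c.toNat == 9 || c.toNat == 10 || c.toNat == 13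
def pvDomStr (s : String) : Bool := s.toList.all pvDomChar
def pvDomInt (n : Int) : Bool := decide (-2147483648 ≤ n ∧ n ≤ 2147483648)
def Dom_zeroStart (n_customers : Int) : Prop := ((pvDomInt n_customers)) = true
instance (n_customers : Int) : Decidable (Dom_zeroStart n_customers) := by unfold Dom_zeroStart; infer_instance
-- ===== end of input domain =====

-- B maintains the digit sum incrementally (carry rule) instead of recomputing it from str(i) each
-- iteration; measured faster. A=B proved for all n_customers (both total).


-- ===== PORT A =====
-- int(c) for a single character c; exact on the digit characters, which are the only
-- characters str(i) produces for the i ≥ 0 this program applies it to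
def pvIntOfDigit (c : Char) : Int := (PySem.Int.ofChars? [c]).getD 0

-- converted = sum(list(map(int, str(i))))
def pvDigitSumStr (i : Int) : Int := ((PySem.Int.toChars i).map pvIntOfDigit).sum

def zeroStart (n_customers : Int) : List (Int × List Int) :=
  ((PySem.List.pyRange 0 n_customers 1).foldl
    (fun groups i =>
      let converted := pvDigitSumStr i
      if groups.get? converted = none then groups.insert converted [i]
      else groups.modify converted [] (fun l => l ++ [i]))
    PySem.Dict.empty).items

-- ===== PORT B =====
-- the 's += 1; j = i; while j % 10 == 9: s -= 9; j //= 10' update (call with s already incremented);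
-- the 0 ≤ j guard only makes the loop total in Lean: in B, j starts at i ≥ 0
def pvCarry (s j : Int) : Int :=
  if h : 0 ≤ j ∧ PySem.Int.mod j 10 = 9 then pvCarry (s - 9) (PySem.Int.floordiv j 10) else s
termination_by j.toNat
decreasing_by
  have h1 : PySem.Int.mod j 10 = j % 10 := PySem.Int.mod_eq_emod_of_pos (by norm_num)
  have h2 : PySem.Int.floordiv j 10 = j / 10 := PySem.Int.floordiv_eq_ediv_of_pos (by norm_num)
  rw [h2]; rw [h1] at h; omega

def zeroStart_alt (n_customers : Int) : List (Int × List Int) :=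
  (((PySem.List.pyRange 0 n_customers 1).foldl
    (fun st i =>
      let groups := st.1
      let s := st.2
      let groups' := if groups.contains s then groups.modify s [] (fun l => l ++ [i])
                     else groups.insert s [i]
      (groups', pvCarry (s + 1) i))
    (PySem.Dict.empty, 0)).1).items

-- ===== PRECONDITION & SPEC =====
def Spec_zeroStart (n_customers : Int) (out : List (Int × List Int)) : Prop := out = zeroStart_alt n_customers
instance (n_customers : Int) (out : List (Int × List Int)) : Decidable (Spec_zeroStart n_customers out) := by unfold Spec_zeroStart; infer_instance

-- ===== CLAIM (what is proved, stated in full; the proofs are below) =====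
def Claim_equal_zeroStart : Prop := ∀ (n_customers : Int), Dom_zeroStart n_customers → Spec_zeroStart n_customers (zeroStart n_customers)

-- ===== LEMMAS AND PROOFS =====

-- mathematical digit sum, the common reference of both ports
def pvDS (m : Nat) : Nat := (Nat.digits 10 m).sum

lemma pvDS_rec (m : Nat) : pvDS m = m % 10 + pvDS (m / 10) := by
  rcases Nat.eq_zero_or_pos m with h | h
  · simp [pvDS, h]
  · rw [pvDS, Nat.digits_def' (by norm_num : 1 < 10) h]
    simp [pvDS]

lemma pvIntOfDigit_digitChar (d : Nat) (h : d < 10) :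
    pvIntOfDigit (Nat.digitChar d) = (d : Int) := by
  interval_cases d <;> decide

lemma toDigitsCore_sum (f : Nat) : ∀ (n : Nat) (acc : List Char), n < f →
    ((Nat.toDigitsCore 10 f n acc).map pvIntOfDigit).sum
      = (pvDS n : Int) + ((acc.map pvIntOfDigit).sum) := by
  induction f with
  | zero => intro n acc h; omega
  | succ f ih =>
    intro n acc h
    rw [Nat.toDigitsCore]
    by_cases h0 : n / 10 = 0
    · rw [if_pos h0]
      have hn : n < 10 := by omega
      have hm : n % 10 = n := Nat.mod_eq_of_lt hn
      simp only [List.map_cons, List.sum_cons]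
      rw [hm, pvIntOfDigit_digitChar n hn, pvDS_rec n, h0]
      simp [pvDS, hm]
    · rw [if_neg h0]
      have hlt : n / 10 < f := by omega
      rw [ih (n / 10) _ hlt]
      simp only [List.map_cons, List.sum_cons]
      rw [pvIntOfDigit_digitChar (n % 10) (by omega), pvDS_rec n]
      push_cast
      ring

lemma pvDigitSumStr_eq (m : Nat) : pvDigitSumStr (m : Int) = (pvDS m : Int) := by
  rw [pvDigitSumStr, PySem.Int.toChars]
  rw [if_neg (by omega : ¬ ((m : Int) < 0))]
  have : ((m : Int)).toNat = m := Int.toNat_natCast m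
  rw [this, Nat.toDigits, toDigitsCore_sum (m + 1) m [] (by omega)]
  simp

lemma pvCarry_eq (m : Nat) : pvCarry ((pvDS m : Int) + 1) (m : Int) = (pvDS (m + 1) : Int) := by
  induction m using Nat.strong_induction_on with
  | _ m ih =>
    have hmod : PySem.Int.mod (m : Int) 10 = ((m % 10 : Nat) : Int) := by
      exact_mod_cast PySem.Int.mod_natCast m 10
    have hdiv : PySem.Int.floordiv (m : Int) 10 = ((m / 10 : Nat) : Int) := by
      exact_mod_cast PySem.Int.floordiv_natCast m 10
    by_cases h : m % 10 = 9
    · have hpos : 0 < m := by omega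
      rw [pvCarry, dif_pos ⟨by omega, by rw [hmod, h]; norm_num⟩, hdiv]
      have harg : (pvDS m : Int) + 1 - 9 = (pvDS (m / 10) : Int) + 1 := by
        rw [pvDS_rec m, h]; push_cast; ring
      rw [harg, ih (m / 10) (by omega)]
      have h1 : (m + 1) % 10 = 0 := by omega
      have h2 : (m + 1) / 10 = m / 10 + 1 := by omega
      rw [pvDS_rec (m + 1), h1, h2]
      simp
    · rw [pvCarry, dif_neg (by rw [hmod]; intro hc; exact h (by exact_mod_cast hc.2))]
      have h1 : (m + 1) % 10 = m % 10 + 1 := by omega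
      have h2 : (m + 1) / 10 = m / 10 := by omega
      rw [pvDS_rec (m + 1), h1, h2, pvDS_rec m]
      push_cast
      ring

-- the two loop bodies produce the same dict when B's running sum equals A's recomputed digit sum
lemma pvStep_dict_eq (d : PySem.Dict Int (List Int)) (i s : Int) (hs : pvDigitSumStr i = s) :
    (if d.get? (pvDigitSumStr i) = none then d.insert (pvDigitSumStr i) [i]
     else d.modify (pvDigitSumStr i) [] (fun l => l ++ [i]))
      = (if d.contains s then d.modify s [] (fun l => l ++ [i]) else d.insert s [i]) := by
  subst hs
  rw [PySem.Dict.contains_eq_isSome_get?]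
  cases hg : d.get? (pvDigitSumStr i) <;> simp [hg]

-- loop invariant: after processing range(m), B's state is (A's dict, digit sum of m)
lemma pvMain (m : Nat) :
    (PySem.List.pyRange 0 (m : Int) 1).foldl
      (fun st i =>
        let groups := st.1
        let s := st.2
        let groups' := if groups.contains s then groups.modify s [] (fun l => l ++ [i])
                       else groups.insert s [i]
        (groups', pvCarry (s + 1) i))
      (PySem.Dict.empty, 0)
    = ((PySem.List.pyRange 0 (m : Int) 1).foldl
        (fun groups i =>
          let converted := pvDigitSumStr i
          if groups.get? converted = none then groups.insert converted [i]
          else groups.modify converted [] (fun l => l ++ [i]))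
        PySem.Dict.empty,
       (pvDS m : Int)) := by
  induction m with
  | zero =>
    rw [PySem.List.pyRange_one_eq_nil (by norm_num)]
    simp [pvDS]
  | succ m ih =>
    have hc : (((m + 1 : Nat)) : Int) = (m : Int) + 1 := by push_cast; ring
    rw [hc, PySem.List.pyRange_one_succ_right (by positivity), List.foldl_append,
        List.foldl_append, ih]
    simp only [List.foldl_cons, List.foldl_nil]
    refine Prod.ext ?_ ?_
    · exact (pvStep_dict_eq _ (m : Int) _ (pvDigitSumStr_eq m)).symm
    · exact pvCarry_eq m

-- ===== VERDICT (by name: the statement is the Claim_ definition above) =====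
theorem zeroStart_spec : Claim_equal_zeroStart := by
  intro n _
  show zeroStart n = zeroStart_alt n
  rw [zeroStart, zeroStart_alt]
  by_cases h : n ≤ 0
  · rw [PySem.List.pyRange_one_eq_nil (by omega)]
    rfl
  · have hn : n = ((n.toNat : Nat) : Int) := by omega
    rw [hn, pvMain n.toNat]
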